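-- pv_equiv track=rewrite | github.com/nzinov/accompaniator | ml/time_measurement.py | get_score_by_notes
-- ===== SOURCE A (Python) =====
-- def get_score_by_notes(chord_a_notes, chord_b_notes, bonus_for_matching_notes):
--     score = 0
--     full_equality = True
--     for note_a in chord_a_notes:
--         found_equal_for_note_a = False
--         for note_b in chord_b_notes:
--             if note_a == note_b:
--                 score += bonus_for_matching_notes
--                 found_equal_for_note_a = True
--                 break  # in case there're lots of same notes in the chord
--         full_equality = full_equality and found_equal_for_note_a
--     return score, full_equality
-- ===== SOURCE B (Python) =====
-- def get_score_by_notes(chord_a_notes, chord_b_notes, bonus_for_matching_notes):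
--     a_sorted = sorted(chord_a_notes)
--     b_sorted = sorted(set(chord_b_notes))
--     i = j = matched = 0
--     while i < len(a_sorted) and j < len(b_sorted):
--         if a_sorted[i] < b_sorted[j]:
--             i += 1
--         elif a_sorted[i] > b_sorted[j]:
--             j += 1
--         else:
--             matched += 1
--             i += 1
--     return matched * bonus_for_matching_notes, matched == len(a_sorted)
-- ===== Notes on version B (the rewrite author's own statement) =====
-- stated objective: faster
-- what changed: Replaces the nested membership scan with sort-then-merge: both lists are sorted (b deduplicated) and a two-pointer merge counts the matching notes; score = count*bonus and full_equality = count == len(chord_a_notes).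
import Mathlib
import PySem

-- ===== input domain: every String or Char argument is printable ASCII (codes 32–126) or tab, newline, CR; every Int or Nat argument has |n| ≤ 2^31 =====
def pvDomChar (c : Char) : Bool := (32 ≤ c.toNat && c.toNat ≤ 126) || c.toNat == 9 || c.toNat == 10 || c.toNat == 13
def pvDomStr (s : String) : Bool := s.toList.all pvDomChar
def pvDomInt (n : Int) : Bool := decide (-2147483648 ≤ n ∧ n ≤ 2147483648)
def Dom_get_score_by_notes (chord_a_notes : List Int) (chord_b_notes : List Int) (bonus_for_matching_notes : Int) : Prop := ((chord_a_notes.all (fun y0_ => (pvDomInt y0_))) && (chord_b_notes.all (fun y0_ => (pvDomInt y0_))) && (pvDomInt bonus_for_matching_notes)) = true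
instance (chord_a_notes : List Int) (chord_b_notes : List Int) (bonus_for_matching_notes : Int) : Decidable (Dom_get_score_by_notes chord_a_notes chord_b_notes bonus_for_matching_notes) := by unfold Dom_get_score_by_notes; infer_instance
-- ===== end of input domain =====

-- B replaces A's nested membership scan with sort-then-merge: sort a, sort deduplicated b,
-- count matches by a two-pointer merge; objective: faster (O(n log n + m log m) vs O(n*m)).

-- ===== PORT A =====
-- inner 'for note_b in chord_b_notes: … break' loop of A
def pvInnerA (note_a : Int) (bs : List Int) (bonus score : Int) : Int × Bool :=
  match bs with
  | [] => (score, false)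
  | note_b :: rest =>
    if note_a == note_b then (score + bonus, true)
    else pvInnerA note_a rest bonus score

def get_score_by_notes (chord_a_notes : List Int) (chord_b_notes : List Int) (bonus_for_matching_notes : Int) : Int × Bool :=
  chord_a_notes.foldl (fun st note_a =>
    let r := pvInnerA note_a chord_b_notes bonus_for_matching_notes st.1
    (r.1, st.2 && r.2)) (0, true)

-- ===== PORT B =====
-- B's while-loop over indices i, j into the two sorted lists; advancing an index = dropping a head
def pvMergeCount (a b : List Int) : Nat :=
  match a, b with
  | [], _ => 0
  | _, [] => 0
  | x :: a', y :: b' =>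
    if x < y then pvMergeCount a' (y :: b')
    else if y < x then pvMergeCount (x :: a') b'
    else 1 + pvMergeCount a' (y :: b')

def get_score_by_notes_alt (chord_a_notes : List Int) (chord_b_notes : List Int) (bonus_for_matching_notes : Int) : Int × Bool :=
  let a_sorted := PySem.List.sorted chord_a_notes (fun x => x) false
  let b_sorted := PySem.List.sorted (PySem.Set.ofList chord_b_notes) (fun x => x) false
  let matched := pvMergeCount a_sorted b_sorted
  ((matched : Int) * bonus_for_matching_notes, matched == a_sorted.length)

-- ===== PRECONDITION & SPEC =====
def Spec_get_score_by_notes (chord_a_notes : List Int) (chord_b_notes : List Int) (bonus_for_matching_notes : Int) (out : Int × Bool) : Prop := out = get_score_by_notes_alt chord_a_notes chord_b_notes bonus_for_matching_notes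
instance (chord_a_notes : List Int) (chord_b_notes : List Int) (bonus_for_matching_notes : Int) (out : Int × Bool) : Decidable (Spec_get_score_by_notes chord_a_notes chord_b_notes bonus_for_matching_notes out) := by unfold Spec_get_score_by_notes; infer_instance

-- ===== CLAIM =====
def Claim_equal_get_score_by_notes : Prop := ∀ (chord_a_notes : List Int) (chord_b_notes : List Int) (bonus_for_matching_notes : Int), Dom_get_score_by_notes chord_a_notes chord_b_notes bonus_for_matching_notes → Spec_get_score_by_notes chord_a_notes chord_b_notes bonus_for_matching_notes (get_score_by_notes chord_a_notes chord_b_notes bonus_for_matching_notes)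

-- ===== LEMMAS AND PROOFS =====

-- A's inner loop adds the bonus exactly when note_a occurs in chord_b_notes
lemma pvInnerA_eq (a : Int) (bs : List Int) (bonus s : Int) :
    pvInnerA a bs bonus s = if bs.contains a then (s + bonus, true) else (s, false) := by
  induction bs with
  | nil => simp [pvInnerA]
  | cons b rest ih =>
    simp only [pvInnerA, ih, List.contains_cons]
    by_cases h : a = b
    · simp [h]
    · simp [h]

-- A's outer fold computes (s + count*bonus, f && decide(count = length))
lemma foldA_eq (bs : List Int) (bonus : Int) (as : List Int) (s : Int) (f : Bool) :
    as.foldl (fun st note_a =>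
      let r := pvInnerA note_a bs bonus st.1
      (r.1, st.2 && r.2)) (s, f)
    = (s + (as.countP (fun n => bs.contains n) : Int) * bonus,
       f && (as.countP (fun n => bs.contains n) == as.length)) := by
  induction as generalizing s f with
  | nil => simp
  | cons a rest ih =>
    rw [List.foldl_cons]
    by_cases h : a ∈ bs
    · have hstep : (let r := pvInnerA a bs bonus (s, f).1
          (r.1, (s, f).2 && r.2)) = (s + bonus, f && true) := by
        simp [pvInnerA_eq, h]
      rw [hstep, ih]
      refine Prod.ext ?_ ?_
      · simp [h]; ring
      · simp only [List.countP_cons, h, List.length_cons, decide_true, if_pos,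
          Bool.and_true, List.contains_eq_mem]
        simp
    · have hstep : (let r := pvInnerA a bs bonus (s, f).1
          (r.1, (s, f).2 && r.2)) = (s, false) := by
        simp [pvInnerA_eq, h]
      rw [hstep, ih]
      refine Prod.ext ?_ ?_
      · simp [h]
      · have hle : rest.countP (fun n => decide (n ∈ bs)) ≤ rest.length :=
          List.countP_le_length
        simp [h]
        omega

-- the two-pointer merge on a sorted list a and a strictly sorted list b counts a's members of b
lemma mergeCount_eq (a b : List Int) (ha : a.Pairwise (· ≤ ·)) (hb : b.Pairwise (· < ·)) :
    pvMergeCount a b = a.countP (fun n => b.contains n) := by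
  induction a generalizing b with
  | nil => simp [pvMergeCount]
  | cons x a' iha =>
    induction b with
    | nil => simp [pvMergeCount]
    | cons y b' ihb =>
      have ha' : a'.Pairwise (· ≤ ·) := ha.tail
      have hxa : ∀ n ∈ a', x ≤ n := fun n hn => (List.pairwise_cons.mp ha).1 n hn
      have hb' : b'.Pairwise (· < ·) := hb.tail
      have hyb : ∀ n ∈ b', y < n := fun n hn => (List.pairwise_cons.mp hb).1 n hn
      by_cases hlt : x < y
      · -- x before every element of y::b', so x ∉ y::b'
        have hx : x ∉ y :: b' := by
          intro hmem
          rcases List.mem_cons.mp hmem with h | h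
          · omega
          · exact absurd (hyb x h) (by omega)
        simp only [pvMergeCount, if_pos hlt]
        rw [iha (y :: b') ha' hb]
        have h1 : x ≠ y := fun h => hx (by simp [h])
        have h2 : x ∉ b' := fun h => hx (by simp [h])
        simp [h1, h2]
      · by_cases hgt : y < x
        · -- y below every element of x::a', so removing y changes no membership
          simp only [pvMergeCount, if_neg hlt, if_pos hgt]
          rw [ihb hb']
          apply List.countP_congr
          intro n hn
          have hxn : x ≤ n := by
            rcases List.mem_cons.mp hn with h | h
            · omega
            · exact hxa n h
          have : n ≠ y := by omega
          simp [this]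
        · -- x = y: a match; keep y to absorb duplicates of x in a'
          have hxy : x = y := by omega
          simp only [pvMergeCount, if_neg hlt, if_neg hgt]
          rw [iha (y :: b') ha' hb]
          simp only [List.countP_cons, List.contains_cons]
          simp [hxy]
          omega

-- ===== VERDICT =====
theorem get_score_by_notes_spec : Claim_equal_get_score_by_notes := by
  intro as bs bonus _
  unfold Spec_get_score_by_notes get_score_by_notes get_score_by_notes_alt
  rw [foldA_eq]
  dsimp only
  have hperm : (PySem.List.sorted as (fun x => x) false).Perm as :=
    PySem.List.sorted_perm as (fun x => x) false
  rw [mergeCount_eq _ _ (PySem.List.sorted_pairwise as (fun x => x))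
        (PySem.List.sorted_ofList_pairwise_lt bs)]
  have hc : (PySem.List.sorted as (fun x => x) false).countP
      (fun n => (PySem.List.sorted (PySem.Set.ofList bs) (fun x => x) false).contains n)
      = as.countP (fun n => bs.contains n) := by
    rw [hperm.countP_eq]
    apply List.countP_congr
    intro n _
    simp [List.contains_eq_mem, PySem.List.mem_sorted, PySem.Set.mem_ofList]
  rw [hc, hperm.length_eq]
  simp
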